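-- pv_equiv track=rewrite | github.com/sivayekolla/python | python/strings/worksheet_1/004_ith_charecter.py | ele
-- ===== SOURCE A (Python) =====
-- def ele(a,b):
--      a=list(a)
--      temp=a
--      v=len(a)
--      k=(v-b)
--      for i in range(0,v):
--           if(i==b):
--                for j in range(0,k-1):
--                     a[b+j]=a[b+j+1]
--                a.pop()
--           else:
--                continue
--      return ''.join(a)
-- ===== SOURCE B (Python) =====
-- def ele(a, b):
--     return ''.join(c for i, c in enumerate(a) if i != b)
-- ===== Notes on version B (the rewrite author's own statement) =====
-- stated objective: idiomatic
-- what changed: Replaces the mutate-in-place strategy (outer scan, shift-left inner loop, pop) with a single selective pass that rebuilds the string keeping every character whose index differs from b.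
import Mathlib
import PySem

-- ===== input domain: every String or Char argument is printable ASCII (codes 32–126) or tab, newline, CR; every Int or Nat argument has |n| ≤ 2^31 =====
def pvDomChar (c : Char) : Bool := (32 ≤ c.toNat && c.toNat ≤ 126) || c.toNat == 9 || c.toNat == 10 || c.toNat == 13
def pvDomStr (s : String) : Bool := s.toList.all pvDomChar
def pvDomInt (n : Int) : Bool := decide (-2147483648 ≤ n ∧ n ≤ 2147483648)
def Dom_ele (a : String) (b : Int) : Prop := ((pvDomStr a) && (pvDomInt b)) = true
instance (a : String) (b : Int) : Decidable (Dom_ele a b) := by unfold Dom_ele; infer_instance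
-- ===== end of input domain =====

-- B replaces A's mutate-in-place strategy (scan, shift-left inner loop, pop) with a single
-- selective pass keeping every character whose index differs from b (idiomatic; same cost).

-- ===== PORT A =====
-- literal transliteration of A: list(a); for i in range(v): if i==b: shift left from b, pop
def ele (a : String) (b : Int) : String :=
  let a0 := a.toList
  let v : Int := a0.length
  let k : Int := v - b
  let aFin := (PySem.List.pyRange 0 v).foldl (fun acc i =>
    if i = b then
      let acc2 := (PySem.List.pyRange 0 (k - 1)).foldl
        (fun ac j => ac.set (b + j).toNat (ac.getD (b + j + 1).toNat ' ')) acc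
      acc2.dropLast
    else acc) a0
  String.ofList aFin
-- (a[b+j] = a[b+j+1] and a.pop() are only reached with 0 ≤ b < v, where the indices are in
-- range and the list nonempty, so List.set / List.getD / List.dropLast are exact there)

-- ===== PORT B =====
-- literal transliteration of B: ''.join(c for i, c in enumerate(a) if i != b)
def ele_alt (a : String) (b : Int) : String :=
  String.ofList (((PySem.List.enumerate a.toList).filter (fun p => p.1 != b)).map (·.2))

-- ===== PRECONDITION & SPEC =====
def Spec_ele (a : String) (b : Int) (out : String) : Prop := out = ele_alt a b
instance (a : String) (b : Int) (out : String) : Decidable (Spec_ele a b out) := by unfold Spec_ele; infer_instance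

-- ===== CLAIM (what is proved, stated in full; the proofs are below) =====
def Claim_equal_ele : Prop := ∀ (a : String) (b : Int), Dom_ele a b → Spec_ele a b (ele a b)

-- ===== LEMMAS AND PROOFS =====

-- B-side: the enumerate/filter pass removes exactly the element at index b (or nothing).
theorem ele_alt_char (cs : List Char) (s b : Int) :
    ((PySem.List.enumerate cs s).filter (fun p => p.1 != b)).map (·.2) =
      if s ≤ b ∧ b < s + cs.length then cs.eraseIdx (b - s).toNat else cs := by
  induction cs generalizing s with
  | nil => simp [PySem.List.enumerate_nil]
  | cons c rest ih =>
    rw [PySem.List.enumerate_cons]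
    by_cases hsb : s = b
    · subst hsb
      simp only [List.filter_cons, bne_self_eq_false, Bool.false_eq_true, if_false, ih]
      have h1 : ¬ (s + 1 ≤ s ∧ s < s + 1 + (rest.length : Int)) := by omega
      have h2 : s ≤ s ∧ s < s + ((c :: rest).length : Int) := by
        refine ⟨le_refl s, ?_⟩
        simp only [List.length_cons]
        push_cast
        omega
      rw [if_neg h1, if_pos h2, show (s - s).toNat = 0 by omega]
      rfl
    · have hne : (((s, c).1) != b) = true := by
        simpa [bne_iff_ne] using hsb
      simp only [List.filter_cons, hne, if_pos, List.map_cons, ih]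
      by_cases hin : s + 1 ≤ b ∧ b < s + 1 + rest.length
      · have hin' : s ≤ b ∧ b < s + ((c :: rest).length : Int) := by
          simp only [List.length_cons]; push_cast; omega
        rw [if_pos hin, if_pos hin']
        have hpos : (b - s).toNat = (b - (s+1)).toNat + 1 := by omega
        simp [hpos]
      · have hin' : ¬ (s ≤ b ∧ b < s + ((c :: rest).length : Int)) := by
          simp only [List.length_cons]; push_cast; omega
        rw [if_neg hin, if_neg hin']

-- A-side inner loop (Nat form): after m left-shift steps the list is
-- take bn ++ (drop (bn+1)).take m ++ drop (bn+m).
theorem shift_inv (cs : List Char) (bn m : Nat) (h : bn + m + 1 ≤ cs.length) :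
    (List.range m).foldl (fun ac j => ac.set (bn + j) (ac.getD (bn + j + 1) ' ')) cs
      = cs.take bn ++ (cs.drop (bn + 1)).take m ++ cs.drop (bn + m) := by
  induction m with
  | zero => simp
  | succ m ih =>
    rw [List.range_succ, List.foldl_append, ih (by omega), List.foldl_cons, List.foldl_nil]
    have hlt : bn + m + 1 < cs.length := by omega
    have hlt' : bn + m < cs.length := by omega
    have hbn : bn < cs.length := by omega
    have hm1 : m ≤ (cs.drop (bn + 1)).length := by simp; omega
    have hm : m < (cs.drop (bn + 1)).length := by simp; omega
    set L := cs.take bn ++ (cs.drop (bn + 1)).take m ++ cs.drop (bn + m) with hL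
    have hlen1 : (cs.take bn ++ (cs.drop (bn + 1)).take m).length = bn + m := by
      simp; omega
    have hdropm : cs.drop (bn + m) = cs[bn + m] :: cs.drop (bn + m + 1) := by
      exact List.drop_eq_getElem_cons hlt'
    have hget : L.getD (bn + m + 1) ' ' = cs[bn + m + 1] := by
      rw [hL, List.getD_eq_getElem?_getD, List.getElem?_append_right (by omega)]
      rw [hlen1, hdropm]
      have : bn + m + 1 - (bn + m) = 1 := by omega
      rw [this]
      simp [List.getElem?_drop]
      rw [List.getElem?_eq_getElem hlt]
      simp
    have hset : L.set (bn + m) cs[bn + m + 1]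
        = cs.take bn ++ (cs.drop (bn + 1)).take (m + 1) ++ cs.drop (bn + m + 1) := by
      rw [hL, List.set_append_right _ _ (by rw [hlen1]), hlen1, Nat.sub_self, hdropm]
      simp only [List.set_cons_zero]
      have htk : (cs.drop (bn + 1)).take (m + 1)
          = (cs.drop (bn + 1)).take m ++ [cs[bn + m + 1]] := by
        rw [List.take_add_one]
        have : (cs.drop (bn + 1))[m]? = some cs[bn + m + 1] := by
          rw [List.getElem?_drop, show bn + 1 + m = bn + m + 1 by omega,
              List.getElem?_eq_getElem hlt]
        simp [this]
      rw [htk]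
      simp [List.append_assoc]
    rw [hget, hset]
    rfl

-- A-side: the whole outer loop equals "erase at b if 0 ≤ b < length, else identity".
theorem ele_char (cs : List Char) (b : Int) :
    (PySem.List.pyRange 0 (cs.length : Int)).foldl (fun acc i =>
      if i = b then
        ((PySem.List.pyRange 0 ((cs.length : Int) - b - 1)).foldl
          (fun ac j => ac.set (b + j).toNat (ac.getD (b + j + 1).toNat ' ')) acc).dropLast
      else acc) cs
      = if 0 ≤ b ∧ b < (cs.length : Int) then cs.eraseIdx b.toNat else cs := by
  by_cases hin : 0 ≤ b ∧ b < (cs.length : Int)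
  · obtain ⟨hb0, hbv⟩ := hin
    rw [if_pos ⟨hb0, hbv⟩]
    set f : List Char → Int → List Char := fun acc i =>
      if i = b then
        ((PySem.List.pyRange 0 ((cs.length : Int) - b - 1)).foldl
          (fun ac j => ac.set (b + j).toNat (ac.getD (b + j + 1).toNat ' ')) acc).dropLast
      else acc with hf
    rw [PySem.List.pyRange_one_append 0 b (cs.length : Int) hb0 (le_of_lt hbv),
        List.foldl_append, PySem.List.pyRange_one_cons hbv, List.foldl_cons]
    have id1 : (PySem.List.pyRange 0 b).foldl f cs = cs := by
      rw [PySem.List.foldl_congr_mem _ f (fun acc _ => acc) cs ?_]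
      · exact List.foldl_fixed ..
      · intro acc x hx
        rw [PySem.List.mem_pyRange_one] at hx
        rw [hf]; simp only []
        rw [if_neg (by omega)]
    rw [id1]
    have id2 : ∀ (st : List Char), (PySem.List.pyRange (b + 1) (cs.length : Int)).foldl f st = st := by
      intro st
      rw [PySem.List.foldl_congr_mem _ f (fun acc _ => acc) st ?_]
      · exact List.foldl_fixed ..
      · intro acc x hx
        rw [PySem.List.mem_pyRange_one] at hx
        rw [hf]; simp only []
        rw [if_neg (by omega)]
    rw [id2]
    rw [hf]; simp only []
    -- now the shift-and-pop step on cs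
    set bn := b.toNat with hbn
    have hbcast : b = (bn : Int) := by omega
    have hbnlt : bn < cs.length := by omega
    have hm : (cs.length : Int) - b - 1 = ((cs.length - bn - 1 : Nat) : Int) := by omega
    rw [hm, PySem.List.pyRange_zero_natCast, List.foldl_map]
    have hbody : (fun (ac : List Char) (k : Nat) =>
          ac.set (b + (k : Int)).toNat (ac.getD (b + (k : Int) + 1).toNat ' '))
        = fun ac j => ac.set (bn + j) (ac.getD (bn + j + 1) ' ') := by
      funext ac j
      have h1 : (b + (j : Int)).toNat = bn + j := by omega
      have h2 : (b + (j : Int) + 1).toNat = bn + j + 1 := by omega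
      rw [h1, h2]
    rw [hbody, shift_inv cs bn (cs.length - bn - 1) (by omega)]
    have hdrop : cs.drop (bn + (cs.length - bn - 1)) = [cs.getLast (by
        intro hnil; rw [hnil] at hbnlt; simp at hbnlt)] := by
      have he : bn + (cs.length - bn - 1) = cs.length - 1 := by omega
      rw [he]
      rw [List.drop_length_sub_one (by intro hnil; rw [hnil] at hbnlt; simp at hbnlt)]
    have htake : (cs.drop (bn + 1)).take (cs.length - bn - 1) = cs.drop (bn + 1) := by
      apply List.take_of_length_le
      simp
      omega
    rw [hdrop, htake]
    simp only [if_true]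
    rw [List.dropLast_concat, List.eraseIdx_eq_take_drop_succ]
  · rw [if_neg hin]
    rw [PySem.List.foldl_congr_mem _ _ (fun acc _ => acc) cs ?_]
    · exact List.foldl_fixed ..
    · intro acc x hx
      rw [PySem.List.mem_pyRange_one] at hx
      rw [if_neg (by omega)]

-- ===== VERDICT (by name: the statement is the Claim_ definition above) =====
theorem ele_spec : Claim_equal_ele := by
  intro a b _
  unfold Spec_ele ele ele_alt
  simp only []
  rw [ele_char a.toList b, ele_alt_char a.toList 0 b]
  have : (b - 0).toNat = b.toNat := by omega
  simp only [zero_add, this]
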